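-- pv_equiv track=rewrite | github.com/G-Just/Python-SHA_256 | SHA.py | sigma_up_0
-- ===== SOURCE A (Python) =====
-- def rotate_r(n, word):
--     for i in range(0, n):
--         word = word[-1] + word
--         word = word[:-1:]
--     return word
--
-- def sigma_up_0(word):
--     ans = ''
--     l1 = rotate_r(2, word)
--     l2 = rotate_r(13, word)
--     l3 = rotate_r(22, word)
--     for i in range(0, len(word)):
--         if int(l1[i]) + int(l2[i]) + int(l3[i]) == 1 or int(l1[i]) + int(l2[i]) + int(l3[i]) == 3:
--             ans += '1'
--         else:
--             ans += '0'
--     return ans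
-- ===== SOURCE B (Python) =====
-- def sigma_up_0(word):
--     L = len(word)
--     out = []
--     for i in range(L):
--         s = int(word[(i - 2) % L]) + int(word[(i - 13) % L]) + int(word[(i - 22) % L])
--         out.append('1' if s == 1 or s == 3 else '0')
--     return ''.join(out)
-- ===== Notes on version B (the rewrite author's own statement) =====
-- stated objective: simpler
-- what changed: B drops rotate_r entirely: instead of materialising three rotated copies of the word (each built by n one-step rotations) and then scanning them, B makes a single pass reading the source digits directly at (i-2)%L, (i-13)%L and (i-22)%L.
import Mathlib
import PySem

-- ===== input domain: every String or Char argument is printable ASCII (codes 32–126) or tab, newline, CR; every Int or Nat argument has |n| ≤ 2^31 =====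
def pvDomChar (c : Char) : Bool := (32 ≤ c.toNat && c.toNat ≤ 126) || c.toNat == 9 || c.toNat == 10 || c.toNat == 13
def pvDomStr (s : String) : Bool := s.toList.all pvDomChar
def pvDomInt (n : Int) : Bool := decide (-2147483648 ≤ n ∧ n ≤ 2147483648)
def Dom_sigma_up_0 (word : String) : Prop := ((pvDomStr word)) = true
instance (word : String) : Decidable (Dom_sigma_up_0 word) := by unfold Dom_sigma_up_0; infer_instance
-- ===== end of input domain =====

-- B replaces A's three whole-string rotation passes by one direct-index pass word[(i-n) % L]; objective: simpler (same return value; no side effects).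

-- ===== PORT A =====
-- int(s[i]) for a one-char Python indexing result; `.getD 0` is unreachable under
-- Pre_sigma_up_0 (none = IndexError / ValueError, both excluded there).
def pvIntAtA (cs : List Char) (i : Int) : Int :=
  (PySem.Int.ofChars? ((PySem.List.pyGet? cs i).toList)).getD 0

-- rotate_r: 'for i in range(0, n): word = word[-1] + word; word = word[:-1:]'
def rotate_r (n : Int) (word : List Char) : List Char :=
  (PySem.List.pyRange 0 n 1).foldl
    (fun w _ =>
      let w := (PySem.List.pyGet? w (-1)).toList ++ w   -- word[-1] + word (none = IndexError, excluded by Pre_)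
      PySem.List.slice w none (some (-1)))              -- word[:-1:]
    word

def sigma_up_0 (word : String) : String :=
  let cs := word.toList
  let l1 := rotate_r 2 cs
  let l2 := rotate_r 13 cs
  let l3 := rotate_r 22 cs
  let ans := (PySem.List.pyRange 0 (cs.length : Int) 1).foldl
    (fun ans i =>
      if pvIntAtA l1 i + pvIntAtA l2 i + pvIntAtA l3 i = 1 ∨
         pvIntAtA l1 i + pvIntAtA l2 i + pvIntAtA l3 i = 3
      then ans ++ ['1'] else ans ++ ['0'])
    []
  String.ofList ans

-- ===== PORT B =====
-- int(word[j]); `.getD 0` is unreachable under Pre_sigma_up_0 (none = ValueError, excluded there).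
def pvDigitB (cs : List Char) (j : Int) : Int :=
  (PySem.Int.ofChars? ((PySem.List.pyGet? cs j).toList)).getD 0

def sigma_up_0_alt (word : String) : String :=
  let cs := word.toList
  let L : Int := cs.length
  let out := (PySem.List.pyRange 0 L 1).foldl
    (fun out i =>
      let s := pvDigitB cs (PySem.Int.mod (i - 2) L) + pvDigitB cs (PySem.Int.mod (i - 13) L) +
               pvDigitB cs (PySem.Int.mod (i - 22) L)
      out ++ [if s = 1 ∨ s = 3 then '1' else '0'])
    []
  String.ofList out

-- ===== PRECONDITION & SPEC =====
-- Python A raises IndexError on the empty string (word[-1]) and ValueError (int(c)) on any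
-- non-digit character; Pre_ excludes exactly those inputs.
def Pre_sigma_up_0 (word : String) : Prop :=
  word.toList ≠ [] ∧ word.toList.all Char.isDigit = true
instance (word : String) : Decidable (Pre_sigma_up_0 word) := by unfold Pre_sigma_up_0; infer_instance

def pvWitness_sigma_up_0 : String := "1101"

def Spec_sigma_up_0 (word : String) (out : String) : Prop := out = sigma_up_0_alt word
instance (word : String) (out : String) : Decidable (Spec_sigma_up_0 word out) := by unfold Spec_sigma_up_0; infer_instance

-- ===== CLAIM (what is proved, stated in full; the proofs are below) =====
def Claim_equal_sigma_up_0 : Prop := ∀ (word : String), Dom_sigma_up_0 word → Pre_sigma_up_0 word → Spec_sigma_up_0 word (sigma_up_0 word)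

-- ===== LEMMAS AND PROOFS =====

-- a foldl that ignores the list elements is function iteration
theorem pvFoldlConst {α β : Type} (l : List β) (f : α → α) (init : α) :
    l.foldl (fun a _ => f a) init = f^[l.length] init := by
  induction l generalizing init with
  | nil => rfl
  | cons x xs ih => simp [List.foldl_cons, ih, Function.iterate_succ_apply]

theorem pvStepRot (w : List Char) (h : w ≠ []) :
    PySem.List.slice ((PySem.List.pyGet? w (-1)).toList ++ w) none (some (-1))
      = w.rotate (w.length - 1) := by
  rw [PySem.List.pyGet?_neg_one, List.getLast?_eq_some_getLast h, PySem.List.slice_to_neg_one,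
      List.rotate_eq_drop_append_take (by omega), List.dropLast_eq_take, List.drop_length_sub_one h]
  cases w with
  | nil => simp at h
  | cons a as => simp [List.take_succ_cons]

theorem pvRotateR (cs : List Char) (h : cs ≠ []) (n : Nat) :
    rotate_r (n : Int) cs = cs.rotate ((cs.length - 1) * n) := by
  unfold rotate_r
  rw [pvFoldlConst, PySem.List.length_pyRange_one]
  simp only [Int.sub_zero, Int.toNat_natCast]
  induction n with
  | zero => simp
  | succ k ih =>
    rw [Function.iterate_succ_apply', ih]
    have hne : cs.rotate ((cs.length - 1) * k) ≠ [] := by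
      intro he; apply h; rwa [← List.rotate_eq_nil_iff (n := (cs.length - 1) * k)]
    rw [pvStepRot _ hne, List.length_rotate, List.rotate_rotate, Nat.mul_succ]

theorem pvCharRot (cs : List Char) (h : cs ≠ []) (n j : Nat) (hj : j < cs.length) :
    (rotate_r (n : Int) cs)[j]?
      = cs[(PySem.Int.mod ((j : Int) - (n : Int)) (cs.length : Int)).toNat]? := by
  have hL : 0 < cs.length := List.length_pos_iff.mpr h
  rw [pvRotateR cs h n, List.getElem?_rotate (by omega)]
  congr 1
  have hpos : (0:Int) < (cs.length : Int) := by exact_mod_cast hL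
  have hm : PySem.Int.mod ((j : Int) - (n : Int)) (cs.length : Int)
      = ((j : Int) - (n : Int)) % (cs.length : Int) :=
    PySem.Int.mod_eq_emod_of_pos hpos
  have he : ((j : Int) - (n : Int)) % (cs.length : Int)
      = (((j + (cs.length - 1) * n) % cs.length : Nat) : Int) := by
    push_cast [Nat.cast_sub (by omega : 1 ≤ cs.length)]
    rw [show ((j:Int) + ((cs.length:Int) - 1) * n) = ((j:Int) - n) + (cs.length:Int) * n by ring,
        Int.add_mul_emod_self_left]
  omega

-- A-side digit read = B-side digit read, for an in-range loop index
theorem pvKey (cs : List Char) (h : cs ≠ []) (n j : Nat) (hj : j < cs.length) :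
    pvIntAtA (rotate_r (n : Int) cs) (j : Int)
      = pvDigitB cs (PySem.Int.mod ((j : Int) - (n : Int)) (cs.length : Int)) := by
  have hpos : (0:Int) < (cs.length : Int) := by
    exact_mod_cast List.length_pos_iff.mpr h
  unfold pvIntAtA pvDigitB
  rw [PySem.List.pyGet?_natCast, pvCharRot cs h n j hj,
      PySem.List.pyGet?_of_nonneg _ (PySem.Int.mod_nonneg _ hpos)]

-- ===== VERDICT (by name: the statement is the Claim_ definition above) =====
theorem sigma_up_0_spec : Claim_equal_sigma_up_0 := by
  unfold Claim_equal_sigma_up_0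
  intro word _ hpre
  unfold Spec_sigma_up_0 sigma_up_0 sigma_up_0_alt
  dsimp only
  congr 1
  refine PySem.List.foldl_congr_mem _ _ _ _ ?_
  intro ans i hi
  rw [PySem.List.mem_pyRange_one] at hi
  obtain ⟨j, rfl⟩ := Int.eq_ofNat_of_zero_le hi.1
  have hj : j < word.toList.length := by exact_mod_cast hi.2
  have hne : word.toList ≠ [] := hpre.1
  have h2 := pvKey word.toList hne 2 j hj
  have h13 := pvKey word.toList hne 13 j hj
  have h22 := pvKey word.toList hne 22 j hj
  simp only [Nat.cast_ofNat] at h2 h13 h22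
  rw [h2, h13, h22]
  split_ifs with hc <;> simp
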